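-- pv_equiv track=rewrite | github.com/rsinghal757/turing_adder | experiments/turing_adder.py | nand_gate
-- ===== SOURCE A (Python) =====
-- def nand_gate(input_bits):
--     tape = input_bits.copy()
--     S0, S1, H = "S0", "S1", "H"
--     head_position = 0
--     current_state = S0
--
--     while current_state != H:
--         symbol = tape[head_position]
--         if current_state == S0:
--             if symbol == 0:
--                 tape[head_position] = 1
--                 head_position += 0
--                 current_state = H
--             else:  # symbol == 1
--                 tape[head_position] = 1
--                 head_position += 1
--                 current_state = S1
--         elif current_state == S1:
--             if symbol == 0:
--                 tape[head_position] = 1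
--                 head_position += 0
--                 current_state = H
--             else:  # symbol == 1
--                 tape[head_position] = 0
--                 head_position += 0
--                 current_state = H
--     return tape[head_position]
-- ===== SOURCE B (Python) =====
-- def nand_gate(input_bits):
--     tape = input_bits.copy()
--     if tape[0] == 0:
--         return 1
--     if tape[1] == 0:
--         return 1
--     return 0
-- ===== Notes on version B (the rewrite author's own statement) =====
-- stated objective: simpler
-- what changed: Replaced the Turing-machine state/tape while-loop simulation with a direct two-branch table lookup (NAND of the first two entries, preserving the access order).
import Mathlib
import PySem

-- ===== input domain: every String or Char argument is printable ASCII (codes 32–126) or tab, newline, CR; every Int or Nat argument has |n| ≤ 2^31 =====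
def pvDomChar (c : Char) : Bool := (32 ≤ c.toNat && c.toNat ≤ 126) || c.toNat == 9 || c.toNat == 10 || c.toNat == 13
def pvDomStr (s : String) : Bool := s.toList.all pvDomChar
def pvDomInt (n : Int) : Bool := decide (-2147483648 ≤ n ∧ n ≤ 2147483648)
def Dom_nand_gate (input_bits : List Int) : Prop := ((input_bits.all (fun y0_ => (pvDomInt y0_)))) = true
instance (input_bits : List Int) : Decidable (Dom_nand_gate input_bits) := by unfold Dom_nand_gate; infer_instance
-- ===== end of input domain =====

-- ===== PORT A =====
-- B replaces A's Turing-machine while-loop with a direct branch on the first two entries (simpler).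
-- States of A's machine.
inductive TMState | S0 | S1 | H
deriving DecidableEq, Repr

def tmRank : TMState → Nat
  | .S0 => 2
  | .S1 => 1
  | .H => 0

-- the while-loop of A: returns (tape, head_position) at halt, none = IndexError.
-- head_position is always ≥ 0 in A, so Nat is exact for it; tape[head] write is List.set.
def nandLoop (tape : List Int) (head : Nat) (st : TMState) : Option (List Int × Nat) :=
  match st with
  | .H => some (tape, head)
  | .S0 =>
    match PySem.List.pyGet? tape (head : Int) with
    | none => none
    | some symbol =>
      if symbol == 0 then nandLoop (tape.set head 1) head .H
      else nandLoop (tape.set head 1) (head + 1) .S1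
  | .S1 =>
    match PySem.List.pyGet? tape (head : Int) with
    | none => none
    | some symbol =>
      if symbol == 0 then nandLoop (tape.set head 1) head .H
      else nandLoop (tape.set head 0) head .H
termination_by tmRank st
decreasing_by all_goals simp [tmRank]

def nand_gate (input_bits : List Int) : Int :=
  match nandLoop input_bits 0 .S0 with
  | none => 0   -- IndexError in A; excluded by Pre_
  | some (tape, head) => (PySem.List.pyGet? tape (head : Int)).getD 0  -- in range under Pre_

-- ===== PORT B =====
def nand_gate_alt (input_bits : List Int) : Int :=
  let tape := input_bits
  match PySem.List.pyGet? tape 0 with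
  | none => 0   -- IndexError in B; excluded by Pre_
  | some s0 =>
    if s0 == 0 then 1
    else
      match PySem.List.pyGet? tape 1 with
      | none => 0   -- IndexError in B; excluded by Pre_
      | some s1 => if s1 == 0 then 1 else 0

-- ===== PRECONDITION & SPEC =====
-- Pre_ excludes exactly the inputs where A (and B) raise IndexError: the empty list,
-- and a one-element list whose only entry is non-zero (the head moves past the tape).
def Pre_nand_gate (input_bits : List Int) : Prop :=
  input_bits ≠ [] ∧ (input_bits.length = 1 → input_bits.headD 0 = 0)
instance (input_bits : List Int) : Decidable (Pre_nand_gate input_bits) := by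
  unfold Pre_nand_gate; infer_instance
def pvWitness_nand_gate : List Int := ([1, 1])

def Spec_nand_gate (input_bits : List Int) (out : Int) : Prop := out = nand_gate_alt input_bits
instance (input_bits : List Int) (out : Int) : Decidable (Spec_nand_gate input_bits out) := by unfold Spec_nand_gate; infer_instance

-- ===== CLAIM (what is proved, stated in full; the proofs are below) =====
def Claim_equal_nand_gate : Prop := ∀ (input_bits : List Int), Dom_nand_gate input_bits → Pre_nand_gate input_bits → Spec_nand_gate input_bits (nand_gate input_bits)

-- ===== LEMMAS AND PROOFS =====

-- ===== VERDICT (by name: the statement is the Claim_ definition above) =====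
theorem nand_gate_spec : Claim_equal_nand_gate := by
  intro l _ hpre
  unfold Spec_nand_gate
  match l with
  | [] => exact absurd rfl hpre.1
  | [x] =>
    have hx : x = 0 := hpre.2 rfl
    subst hx
    simp [nand_gate, nandLoop, nand_gate_alt, PySem.List.pyGet?, PySem.List.pyIdx?]
  | x :: y :: rest =>
    by_cases hx : x = 0
    · subst hx
      simp [nand_gate, nandLoop, nand_gate_alt, PySem.List.pyGet?, PySem.List.pyIdx?,
        show (0:Int) ≤ (rest.length:Int) + 1 from by positivity]
    · by_cases hy : y = 0
      · subst hy
        simp [nand_gate, nandLoop, nand_gate_alt, PySem.List.pyGet?, PySem.List.pyIdx?, hx,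
          show (0:Int) ≤ (rest.length:Int) + 1 from by positivity]
      · simp [nand_gate, nandLoop, nand_gate_alt, PySem.List.pyGet?, PySem.List.pyIdx?, hx, hy,
          show (0:Int) ≤ (rest.length:Int) + 1 from by positivity]
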